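-- pv_equiv track=rewrite | github.com/ArtemErmilov/ArtemErmilov_Python_HW3 | HW3_Example005.py | fibonacy
-- ===== SOURCE A (Python) =====
-- def fibonacy (n):
--     list1=[]
--     for i in range(0,n+1):
--         if i ==0:
--             list1.append(0)
--         if i==1 or i ==2:
--             list1.append(1)
--         elif i>2:
--             list1.append(list1[(i-1)]+list1[(i-2)])
--
--     list2 =[]
--     for i in range(1,n+1):
--        list2.append((-1)**(i+1)*list1[i])
--
--     list2.reverse()
--     return list2+list1
-- ===== SOURCE B (Python) =====
-- def fibonacy(n):
--     # The result is exactly the Fibonacci sequence extended to negative indices: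
--     # [fib(k) for k in range(-n, n+1)], since fib(-i) = (-1)**(i+1) * fib(i).
--     # Step the pair (fib(k), fib(k+1)) backwards n times, then sweep forward once.
--     a, b = 0, 1
--     for _ in range(n):          # backwards: fib(k-1) = fib(k+1) - fib(k)
--         a, b = b - a, a
--     out = []
--     for _ in range(2 * n + 1):  # forward over the whole symmetric range
--         out.append(a)
--         a, b = b, a + b
--     return out
-- ===== Notes on version B (the rewrite author's own statement) =====
-- stated objective: alternative
-- what changed: B uses the negafibonacci identity fib(-i)=(-1)**(i+1)*fib(i): instead of building the Fibonacci list, a second signed pass and a reverse()+concat, it steps the pair (fib(k),fib(k+1)) backwards n times to fib(-n) and emits the whole answer in one forward sweep over range(-n, n+1), with no signs, no reverse and no list indexing.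
import Mathlib
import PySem

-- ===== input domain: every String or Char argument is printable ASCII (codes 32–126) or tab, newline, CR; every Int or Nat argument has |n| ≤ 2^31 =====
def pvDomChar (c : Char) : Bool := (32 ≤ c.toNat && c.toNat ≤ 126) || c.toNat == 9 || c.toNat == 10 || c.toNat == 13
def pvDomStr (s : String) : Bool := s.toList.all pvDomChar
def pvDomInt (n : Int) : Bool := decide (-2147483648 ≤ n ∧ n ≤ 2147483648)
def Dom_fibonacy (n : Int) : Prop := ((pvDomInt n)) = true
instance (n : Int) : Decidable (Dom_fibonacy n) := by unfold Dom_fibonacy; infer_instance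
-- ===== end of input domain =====

-- B uses the negafibonacci identity fib(-i) = (-1)^(i+1)·fib(i): it steps the Fibonacci pair
-- backwards to fib(-n) and emits the whole answer in one forward sweep over range(-n, n+1),
-- with no sign pass, no reverse and no list indexing (objective: alternative algorithm).

-- ===== PORT A =====
-- body of A's first for-loop (the if / if-elif ladder, with list1.append as ++ [·]).
-- For i > 2 the indices i-1, i-2 are always in range of list1, so pyGetD's default 0 is never used.
def fibStepA (list1 : List Int) (i : Int) : List Int :=
  let list1 := if i = 0 then list1 ++ [(0 : Int)] else list1
  if i = 1 ∨ i = 2 then list1 ++ [1]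
  else if i > 2 then
    list1 ++ [PySem.List.pyGetD list1 (i - 1) 0 + PySem.List.pyGetD list1 (i - 2) 0]
  else list1

def fibonacy (n : Int) : List Int :=
  let list1 := (PySem.List.pyRange 0 (n + 1) 1).foldl fibStepA []
  -- (-1)**(i+1): the exponent i+1 is ≥ 2 throughout this loop, so .toNat is exact
  let list2 := (PySem.List.pyRange 1 (n + 1) 1).foldl
    (fun list2 i => list2 ++ [(-1 : Int) ^ (i + 1).toNat * PySem.List.pyGetD list1 i 0]) []
  list2.reverse ++ list1

-- ===== PORT B =====
-- B's backward loop body: (a, b) ← (b - a, a)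
def backStepB (s : Int × Int) (_ : Int) : Int × Int := (s.2 - s.1, s.1)

-- B's forward loop body: out.append(a); (a, b) ← (b, a + b); state = (a, b, out)
def fwdStepB (s : Int × Int × List Int) (_ : Int) : Int × Int × List Int :=
  (s.2.1, s.1 + s.2.1, s.2.2 ++ [s.1])

def fibonacy_alt (n : Int) : List Int :=
  let p := (PySem.List.pyRange 0 n 1).foldl backStepB (0, 1)
  let r := (PySem.List.pyRange 0 (2 * n + 1) 1).foldl fwdStepB (p.1, p.2, [])
  r.2.2

-- ===== PRECONDITION & SPEC =====
def Spec_fibonacy (n : Int) (out : List Int) : Prop := out = fibonacy_alt n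
instance (n : Int) (out : List Int) : Decidable (Spec_fibonacy n out) := by unfold Spec_fibonacy; infer_instance

-- ===== CLAIM (what is proved, stated in full; the proofs are below) =====
def Claim_equal_fibonacy : Prop := ∀ (n : Int), Dom_fibonacy n → Spec_fibonacy n (fibonacy n)

-- ===== LEMMAS AND PROOFS =====

-- reference Fibonacci numbers
def fibRef : Nat → Int
  | 0 => 0
  | 1 => 1
  | (k + 2) => fibRef k + fibRef (k + 1)

def fibI (i : Int) : Int := fibRef i.toNat

def sgnFib (i : Int) : Int := if PySem.Int.mod i 2 = 1 then fibI i else -fibI i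

-- Fibonacci extended to all integer indices (negafibonacci)
def gfib (i : Int) : Int :=
  if 0 ≤ i then fibRef i.toNat
  else if (-i).toNat % 2 = 1 then fibRef (-i).toNat else -fibRef (-i).toNat

theorem fibI_add_two (m : Nat) (h : 2 ≤ m) :
    fibI ((m : Int) - 1) + fibI ((m : Int) - 2) = fibI (m : Int) := by
  obtain ⟨k, rfl⟩ : ∃ k, m = k + 2 := ⟨m - 2, by omega⟩
  have h1 : (((k + 2 : Nat) : Int) - 1).toNat = k + 1 := by omega
  have h2 : (((k + 2 : Nat) : Int) - 2).toNat = k := by omega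
  simp only [fibI, h1, h2, Int.toNat_natCast]
  show fibRef (k + 1) + fibRef k = fibRef (k + 2)
  simp [fibRef]; ring

theorem gfib_add (i : Int) : gfib (i + 2) = gfib i + gfib (i + 1) := by
  rcases le_or_gt 0 i with hi | hi
  · have h0 : (0 : Int) ≤ i + 1 := by omega
    have h2 : (0 : Int) ≤ i + 2 := by omega
    have e1 : (i + 1).toNat = i.toNat + 1 := by omega
    have e2 : (i + 2).toNat = i.toNat + 2 := by omega
    simp only [gfib, if_pos hi, if_pos h0, if_pos h2, e1, e2]
    simp [fibRef]
  · rcases eq_or_lt_of_le (by omega : i ≤ -1) with h | h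
    · subst h; decide
    · rcases eq_or_lt_of_le (by omega : i ≤ -2) with h2 | h2
      · subst h2; decide
      · -- i ≤ -3
        obtain ⟨k, rfl⟩ : ∃ k : Nat, i = -(k : Int) - 3 := ⟨(-i - 3).toNat, by omega⟩
        have e0 : (-(-(k : Int) - 3)).toNat = k + 3 := by omega
        have e1 : (-(-(k : Int) - 3 + 1)).toNat = k + 2 := by omega
        have e2 : (-(-(k : Int) - 3 + 2)).toNat = k + 1 := by omega
        have n0 : ¬ (0 : Int) ≤ -(k : Int) - 3 := by omega
        have n1 : ¬ (0 : Int) ≤ -(k : Int) - 3 + 1 := by omega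
        have n2 : ¬ (0 : Int) ≤ -(k : Int) - 3 + 2 := by omega
        have hf : fibRef (k + 3) = fibRef (k + 1) + fibRef (k + 2) := by
          simp [fibRef]
        rcases Nat.even_or_odd k with hk | hk
        · obtain ⟨j, rfl⟩ := hk
          have p0 : (j + j + 3) % 2 = 1 := by omega
          have p1 : (j + j + 2) % 2 = 0 := by omega
          have p2 : (j + j + 1) % 2 = 1 := by omega
          simp only [gfib, if_neg n0, if_neg n1, if_neg n2, e0, e1, e2, p0, p1, p2]
          norm_num [hf]
        · obtain ⟨j, rfl⟩ := hk
          have p0 : (2 * j + 1 + 3) % 2 = 0 := by omega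
          have p1 : (2 * j + 1 + 2) % 2 = 1 := by omega
          have p2 : (2 * j + 1 + 1) % 2 = 0 := by omega
          simp only [gfib, if_neg n0, if_neg n1, if_neg n2, e0, e1, e2, p0, p1, p2]
          norm_num [hf]

theorem loopA (m : Nat) :
    (PySem.List.pyRange 0 (m : Int) 1).foldl fibStepA []
      = (PySem.List.pyRange 0 (m : Int) 1).map fibI := by
  induction m with
  | zero => simp [PySem.List.pyRange_one_eq_nil]
  | succ m ih =>
    have hsplit : PySem.List.pyRange 0 ((m : Int) + 1) 1
        = PySem.List.pyRange 0 (m : Int) 1 ++ [(m : Int)] :=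
      PySem.List.pyRange_one_succ_right (by omega)
    push_cast
    rw [hsplit, List.foldl_append, List.map_append, ih]
    simp only [List.foldl_cons, List.foldl_nil, List.map_cons, List.map_nil]
    match m, ih with
    | 0, _ => decide
    | 1, _ => decide
    | 2, _ => decide
    | (k + 3), _ =>
      have h3 : ¬ ((k + 3 : Nat) : Int) = 0 := by omega
      have h4 : ¬ (((k + 3 : Nat) : Int) = 1 ∨ ((k + 3 : Nat) : Int) = 2) := by omega
      have h5 : ((k + 3 : Nat) : Int) > 2 := by omega
      rw [fibStepA, if_neg h3, if_neg h4, if_pos h5,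
        PySem.List.pyGetD_map_pyRange_of_nonneg _ _ _ _ (by omega) (by omega),
        PySem.List.pyGetD_map_pyRange_of_nonneg _ _ _ _ (by omega) (by omega),
        fibI_add_two (k + 3) (by omega)]

theorem neg_one_pow_eq (i : Int) (h : 1 ≤ i) :
    (-1 : Int) ^ (i + 1).toNat = if PySem.Int.mod i 2 = 1 then 1 else -1 := by
  have hmod : PySem.Int.mod i 2 = i % 2 := by
    show Int.fmod i 2 = i % 2
    simp [Int.fmod_eq_emod]
  obtain ⟨k, rfl⟩ : ∃ k : Nat, i = (k : Int) := ⟨i.toNat, by omega⟩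
  have ht : ((k : Int) + 1).toNat = k + 1 := by omega
  rw [hmod, ht]
  rcases Nat.even_or_odd k with he | ho
  · obtain ⟨j, rfl⟩ := he
    have h2 : ((j + j : Nat) : Int) % 2 = 0 := by push_cast; omega
    rw [Odd.neg_one_pow (Even.add_one (by exact ⟨j, rfl⟩)), if_neg (by rw [h2]; decide)]
  · obtain ⟨j, rfl⟩ := ho
    have h2 : ((2 * j + 1 : Nat) : Int) % 2 = 1 := by push_cast; omega
    rw [Even.neg_one_pow (Odd.add_one (by exact ⟨j, rfl⟩)), if_pos h2]

-- B's backward loop reaches (fib(-m), fib(-m+1))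
theorem loopBack (m : Nat) :
    (PySem.List.pyRange 0 (m : Int) 1).foldl backStepB (0, 1)
      = (gfib (-(m : Int)), gfib (-(m : Int) + 1)) := by
  induction m with
  | zero => simp [PySem.List.pyRange_one_eq_nil]; decide
  | succ m ih =>
    have hsplit : PySem.List.pyRange 0 ((m : Int) + 1) 1
        = PySem.List.pyRange 0 (m : Int) 1 ++ [(m : Int)] :=
      PySem.List.pyRange_one_succ_right (by omega)
    push_cast
    rw [hsplit, List.foldl_append, ih]
    simp only [List.foldl_cons, List.foldl_nil, backStepB, Prod.mk.injEq]
    have h := gfib_add (-(m : Int) - 1)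
    rw [show (-(m : Int) - 1 + 2) = -(m : Int) + 1 by ring,
        show (-(m : Int) - 1 + 1) = -(m : Int) by ring] at h
    constructor
    · rw [show (-((m : Int) + 1)) = -(m : Int) - 1 by ring]; omega
    · rw [show (-((m : Int) + 1) + 1) = -(m : Int) by ring]

-- B's forward loop emits gfib over the range [s, s+M)
theorem loopFwd (s : Int) (acc : List Int) (M : Nat) :
    (PySem.List.pyRange 0 (M : Int) 1).foldl fwdStepB (gfib s, gfib (s + 1), acc)
      = (gfib (s + M), gfib (s + M + 1),
         acc ++ (PySem.List.pyRange s (s + M) 1).map gfib) := by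
  induction M with
  | zero => simp [PySem.List.pyRange_one_eq_nil]
  | succ M ih =>
    have hsplit : PySem.List.pyRange 0 ((M : Int) + 1) 1
        = PySem.List.pyRange 0 (M : Int) 1 ++ [(M : Int)] :=
      PySem.List.pyRange_one_succ_right (by omega)
    have hsplit2 : PySem.List.pyRange s (s + (M : Int) + 1) 1
        = PySem.List.pyRange s (s + (M : Int)) 1 ++ [s + (M : Int)] :=
      PySem.List.pyRange_one_succ_right (by omega)
    push_cast
    rw [hsplit, List.foldl_append, ih]
    simp only [List.foldl_cons, List.foldl_nil, fwdStepB, Prod.mk.injEq]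
    have h := gfib_add (s + (M : Int))
    refine ⟨?_, ?_, ?_⟩
    · rw [show s + ((M : Int) + 1) = s + (M : Int) + 1 by ring]
    · rw [show s + ((M : Int) + 1) + 1 = s + (M : Int) + 2 by ring]; omega
    · rw [show s + ((M : Int) + 1) = s + (M : Int) + 1 by ring, hsplit2]
      simp

-- alignment of A's signed value with the negative-index Fibonacci
theorem sgnFib_eq_gfib_neg (m : Nat) :
    sgnFib ((m : Int) + 1) = gfib (-((m : Int) + 1)) := by
  have hmod : PySem.Int.mod ((m : Int) + 1) 2 = ((m : Int) + 1) % 2 := by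
    show Int.fmod _ 2 = _
    simp [Int.fmod_eq_emod]
  have hneg : ¬ (0 : Int) ≤ -((m : Int) + 1) := by omega
  have htn : (-(-((m : Int) + 1))).toNat = m + 1 := by omega
  have hfi : fibI ((m : Int) + 1) = fibRef (m + 1) := by
    unfold fibI
    rw [show (((m : Int) + 1)).toNat = m + 1 from by omega]
  rcases Nat.even_or_odd (m + 1) with he | ho
  · have p : (m + 1) % 2 = 0 := Nat.even_iff.mp he
    have pi : ((m : Int) + 1) % 2 = 0 := by exact_mod_cast p
    simp only [sgnFib, gfib, if_neg hneg, htn, hmod, pi, p, hfi]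
    rfl
  · have p : (m + 1) % 2 = 1 := Nat.odd_iff.mp ho
    have pi : ((m : Int) + 1) % 2 = 1 := by exact_mod_cast p
    simp only [sgnFib, gfib, if_neg hneg, htn, hmod, pi, p, hfi]

-- A's reversed signed prefix is gfib over the negative range [-m, 0)
theorem revSigned (m : Nat) :
    ((PySem.List.pyRange 1 ((m : Int) + 1) 1).map sgnFib).reverse
      = (PySem.List.pyRange (-(m : Int)) 0 1).map gfib := by
  induction m with
  | zero => simp [PySem.List.pyRange_one_eq_nil]
  | succ m ih =>
    have hsplit : PySem.List.pyRange 1 ((m : Int) + 1 + 1) 1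
        = PySem.List.pyRange 1 ((m : Int) + 1) 1 ++ [(m : Int) + 1] :=
      PySem.List.pyRange_one_succ_right (by omega)
    have hcons : PySem.List.pyRange (-((m : Int) + 1)) 0 1
        = (-((m : Int) + 1)) :: PySem.List.pyRange (-((m : Int) + 1) + 1) 0 1 :=
      PySem.List.pyRange_one_cons (by omega)
    push_cast
    rw [hsplit, hcons, show (-((m : Int) + 1) + 1) = -(m : Int) by ring]
    simp only [List.map_append, List.map_cons, List.reverse_append, List.map_nil,
      List.reverse_cons, List.reverse_nil, List.nil_append, List.singleton_append]
    rw [ih, sgnFib_eq_gfib_neg]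

-- ===== VERDICT (by name: the statement is the Claim_ definition above) =====
theorem fibonacy_spec : Claim_equal_fibonacy := by
  intro n _
  unfold Spec_fibonacy fibonacy fibonacy_alt
  by_cases hn : n + 1 ≤ 0
  · rw [PySem.List.pyRange_one_eq_nil hn, PySem.List.pyRange_one_eq_nil (by omega : n + 1 ≤ 1),
        PySem.List.pyRange_one_eq_nil (by omega : 2 * n + 1 ≤ 0)]
    rfl
  · obtain ⟨m, rfl⟩ : ∃ m : Nat, n = (m : Int) := ⟨n.toNat, by omega⟩
    have hA1 : (m : Int) + 1 = ((m + 1 : Nat) : Int) := by push_cast; ring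
    rw [hA1, loopA, ← hA1]
    -- backward loop
    rw [show (PySem.List.pyRange 0 (m : Int) 1).foldl backStepB (0, 1)
          = (gfib (-(m : Int)), gfib (-(m : Int) + 1)) from loopBack m]
    -- forward loop
    have hM : (2 * (m : Int) + 1) = ((2 * m + 1 : Nat) : Int) := by push_cast; ring
    have hfwd := loopFwd (-(m : Int)) [] (2 * m + 1)
    simp only []
    rw [show (-(m : Int) + 1) = (-(m : Int)) + 1 by ring, hM, hfwd]
    simp only [List.nil_append]
    rw [show (-(m : Int)) + ((2 * m + 1 : Nat) : Int) = (m : Int) + 1 by push_cast; ring]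
    -- split B's range at 0
    rw [PySem.List.pyRange_one_append (-(m : Int)) 0 ((m : Int) + 1) (by omega) (by omega),
        List.map_append]
    congr 1
    · -- signed prefix: rewrite A's loop to a map, then to gfib on negatives
      rw [PySem.List.foldl_append_singleton_eq_map]
      simp only [List.nil_append]
      rw [show ((PySem.List.pyRange 1 ((m : Int) + 1) 1).map
            (fun i => (-1 : Int) ^ (i + 1).toNat *
              PySem.List.pyGetD ((PySem.List.pyRange 0 ((m : Int) + 1) 1).map fibI) i 0))
          = (PySem.List.pyRange 1 ((m : Int) + 1) 1).map sgnFib from ?_, revSigned]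
      apply List.map_congr_left
      intro i hi
      have hmem := (PySem.List.mem_pyRange_one).mp hi
      rw [PySem.List.pyGetD_map_pyRange_of_nonneg _ _ _ _ (by omega) (by omega),
        neg_one_pow_eq i (by omega)]
      unfold sgnFib
      split_ifs <;> ring
    · -- nonnegative part: gfib = fibI there
      apply List.map_congr_left
      intro i hi
      have hmem := (PySem.List.mem_pyRange_one).mp hi
      simp [gfib, fibI, hmem.1]
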